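-- pv_equiv track=rewrite | github.com/simiroa/CONTEXTUP | ContextUp/src/features/sequence/tools.py | format_missing_ranges
-- ===== SOURCE A (Python) =====
-- def format_missing_ranges(missing_frames: list) -> str:
--     """Format a list of numbers into ranges (e.g. '101-105, 107, 109-112')."""
--     if not missing_frames:
--         return ""
--
--     ranges = []
--     start = missing_frames[0]
--     prev = start
--
--     for x in missing_frames[1:]:
--         if x == prev + 1:
--             prev = x
--         else:
--             if start == prev:
--                 ranges.append(str(start))
--             else:
--                 ranges.append(f"{start}-{prev}")
--             start = x
--             prev = x
--
--     # Last group
--     if start == prev: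
--         ranges.append(str(start))
--     else:
--         ranges.append(f"{start}-{prev}")
--
--     return ", ".join(ranges)
-- ===== SOURCE B (Python) =====
-- def format_missing_ranges(missing_frames: list) -> str:
--     """Format a list of numbers into ranges via the classic x - i grouping key:
--     consecutive elements of an ascending +1 run share the same key, so the list
--     is partitioned by scanning key-equal blocks and each block is rendered at once."""
--     pairs = [(x - i, x) for i, x in enumerate(missing_frames)]
--     parts = []
--     while pairs:
--         key = pairs[0][0]
--         j = 1
--         while j < len(pairs) and pairs[j][0] == key:
--             j += 1
--         group = [x for _, x in pairs[:j]]
--         parts.append(str(group[0]) if len(group) == 1 else f"{group[0]}-{group[-1]}")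
--         pairs = pairs[j:]
--     return ", ".join(parts)
-- ===== Notes on version B (the rewrite author's own statement) =====
-- stated objective: alternative
-- what changed: Replaces A's stateful start/prev fold with the x - i grouping-key decomposition: tag each element with key x - i, partition the tagged list into maximal key-equal blocks by slicing, and render each block from its first and last element.
import Mathlib
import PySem

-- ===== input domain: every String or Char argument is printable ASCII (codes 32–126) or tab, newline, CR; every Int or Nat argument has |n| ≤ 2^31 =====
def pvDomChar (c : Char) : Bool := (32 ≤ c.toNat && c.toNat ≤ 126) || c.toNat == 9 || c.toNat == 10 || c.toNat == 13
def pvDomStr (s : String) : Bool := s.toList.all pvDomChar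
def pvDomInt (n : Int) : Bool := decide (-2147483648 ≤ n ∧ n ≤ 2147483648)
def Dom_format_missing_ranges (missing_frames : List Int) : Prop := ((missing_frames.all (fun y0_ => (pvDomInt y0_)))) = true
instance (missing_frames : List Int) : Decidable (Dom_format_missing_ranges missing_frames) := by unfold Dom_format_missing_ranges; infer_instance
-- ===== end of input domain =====

-- B replaces A's stateful start/prev fold with the x - i grouping-key decomposition
-- (tag, partition into key-equal blocks, render each block); an alternative of the same cost.


-- ===== PORT A =====
-- the for-loop over missing_frames[1:] with state (ranges, start, prev)
def fmrLoopA (ranges : List String) (start prev : Int) : List Int → List String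
  | [] =>
      -- last group, after the loop
      ranges ++ [if start = prev then PySem.Int.toStr start
                 else PySem.Int.toStr start ++ "-" ++ PySem.Int.toStr prev]
  | x :: xs =>
      if x = prev + 1 then fmrLoopA ranges start x xs
      else fmrLoopA (ranges ++ [if start = prev then PySem.Int.toStr start
                                else PySem.Int.toStr start ++ "-" ++ PySem.Int.toStr prev]) x x xs

def format_missing_ranges (missing_frames : List Int) : String :=
  match missing_frames with
  | [] => ""
  | h :: t => PySem.Str.join ", " (fmrLoopA [] h h t)

-- ===== PORT B =====
-- the inner 'while j < len(pairs) and pairs[j][0] == key: j += 1' scan (j counted past index 0)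
def fmrScan (key : Int) : List (Int × Int) → Nat
  | [] => 0
  | q :: rest => if q.1 == key then fmrScan key rest + 1 else 0

-- the outer 'while pairs:' loop: peel one key-equal block, render it, continue on pairs[j:]
def fmrBlocks : List (Int × Int) → List String
  | [] => []
  | (key, x) :: rest =>
      -- group = [x for _, x in pairs[:j]] (head x); group[-1] is the getLast of the cons
      (if (x :: ((rest.take (fmrScan key rest)).map (fun q => q.2))).length = 1
       then PySem.Int.toStr x
       else PySem.Int.toStr x ++ "-"
              ++ PySem.Int.toStr ((x :: ((rest.take (fmrScan key rest)).map (fun q => q.2))).getLastD 0))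
        :: fmrBlocks (rest.drop (fmrScan key rest))
  termination_by l => l.length
  decreasing_by simp only [List.length_drop, List.length_cons]; omega

def format_missing_ranges_alt (missing_frames : List Int) : String :=
  PySem.Str.join ", "
    (fmrBlocks ((PySem.List.enumerate missing_frames).map (fun p => (p.2 - p.1, p.2))))

-- ===== PRECONDITION & SPEC =====
def Spec_format_missing_ranges (missing_frames : List Int) (out : String) : Prop := out = format_missing_ranges_alt missing_frames
instance (missing_frames : List Int) (out : String) : Decidable (Spec_format_missing_ranges missing_frames out) := by unfold Spec_format_missing_ranges; infer_instance

-- ===== CLAIM (what is proved, stated in full; the proofs are below) =====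
def Claim_equal_format_missing_ranges : Prop := ∀ (missing_frames : List Int), Dom_format_missing_ranges missing_frames → Spec_format_missing_ranges missing_frames (format_missing_ranges missing_frames)

-- ===== LEMMAS AND PROOFS =====

-- rendering of one finished group (the ite duplicated inside fmrLoopA)
def fmrRender (s p : Int) : String :=
  if s = p then PySem.Int.toStr s else PySem.Int.toStr s ++ "-" ++ PySem.Int.toStr p

-- maximal +1-run extension: (run, rest)
def fmrExt (p : Int) : List Int → List Int × List Int
  | [] => ([], [])
  | y :: ys => if y = p + 1 then (y :: (fmrExt y ys).1, (fmrExt y ys).2) else ([], y :: ys)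

-- tagged pairs starting at index i
def fmrPairs (i : Int) (l : List Int) : List (Int × Int) :=
  (PySem.List.enumerate l i).map (fun p => (p.2 - p.1, p.2))

theorem fmrPairs_nil (i : Int) : fmrPairs i [] = [] := by
  simp [fmrPairs, PySem.List.enumerate_nil]

theorem fmrPairs_cons (i : Int) (x : Int) (xs : List Int) :
    fmrPairs i (x :: xs) = (x - i, x) :: fmrPairs (i + 1) xs := by
  simp [fmrPairs, PySem.List.enumerate_cons]

theorem fmrPairs_map_snd (i : Int) (l : List Int) : (fmrPairs i l).map (fun q => q.2) = l := by
  induction l generalizing i with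
  | nil => simp [fmrPairs_nil]
  | cons x xs ih => simp [fmrPairs_cons, ih]

theorem fmrBlocks_cons (key x : Int) (rest : List (Int × Int)) :
    fmrBlocks ((key, x) :: rest)
      = (if (x :: ((rest.take (fmrScan key rest)).map (fun q => q.2))).length = 1
         then PySem.Int.toStr x
         else PySem.Int.toStr x ++ "-"
                ++ PySem.Int.toStr ((x :: ((rest.take (fmrScan key rest)).map (fun q => q.2))).getLastD 0))
          :: fmrBlocks (rest.drop (fmrScan key rest)) := by
  rw [fmrBlocks]

theorem fmrExt_len (p : Int) (xs : List Int) :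
    (fmrExt p xs).1.length + (fmrExt p xs).2.length = xs.length := by
  induction xs generalizing p with
  | nil => simp [fmrExt]
  | cons y ys ih =>
      rw [fmrExt]
      by_cases h : y = p + 1
      · rw [if_pos h]
        have := ih y
        simp only [List.length_cons]
        omega
      · rw [if_neg h]; simp

theorem fmrExt_gt (p : Int) (xs : List Int) : ∀ y ∈ (fmrExt p xs).1, p < y := by
  induction xs generalizing p with
  | nil => simp [fmrExt]
  | cons z zs ih =>
      rw [fmrExt]
      by_cases h : z = p + 1
      · rw [if_pos h]
        intro y hy
        rcases List.mem_cons.mp hy with rfl | hy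
        · omega
        · have := ih z y hy; omega
      · rw [if_neg h]; simp

-- the scan/take/drop of the tagged tail realise exactly the +1-run extension
theorem fmrScan_ext (xs : List Int) (i p : Int) :
    fmrScan (p - i) (fmrPairs (i + 1) xs) = (fmrExt p xs).1.length
    ∧ (fmrPairs (i + 1) xs).take (fmrExt p xs).1.length = fmrPairs (i + 1) (fmrExt p xs).1
    ∧ (fmrPairs (i + 1) xs).drop (fmrExt p xs).1.length
        = fmrPairs (i + 1 + (fmrExt p xs).1.length) (fmrExt p xs).2 := by
  induction xs generalizing i p with
  | nil => simp [fmrPairs_nil, fmrExt, fmrScan]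
  | cons y ys ih =>
      rw [fmrPairs_cons, fmrExt]
      by_cases h : y = p + 1
      · rw [if_pos h]
        have hk : y - (i + 1) = p - i := by omega
        have ih' := ih (i + 1) y
        refine ⟨?_, ?_, ?_⟩
        · rw [fmrScan, if_pos (by simpa using hk), ← hk, ih'.1]
          simp
        · simp only [List.length_cons, List.take_succ_cons, fmrPairs_cons]
          rw [ih'.2.1]
        · simp only [List.length_cons, List.drop_succ_cons]
          rw [ih'.2.2]
          congr 1
          push_cast
          ring
      · rw [if_neg h]
        have hk : ¬ ((y - (i + 1) : Int) == p - i) = true := by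
          simp only [beq_iff_eq]; omega
        refine ⟨?_, ?_, ?_⟩
        · rw [fmrScan, if_neg hk]; simp
        · simp [fmrPairs_nil]
        · simp [fmrPairs_cons]

-- accumulator lemma for A's loop
theorem fmrLoopA_acc (xs : List Int) (ranges : List String) (s p : Int) :
    fmrLoopA ranges s p xs = ranges ++ fmrLoopA [] s p xs := by
  induction xs generalizing ranges s p with
  | nil => simp [fmrLoopA]
  | cons x xs ih =>
      by_cases h : x = p + 1
      · rw [fmrLoopA, if_pos h, fmrLoopA, if_pos h]
        exact ih ..
      · rw [fmrLoopA, if_neg h, fmrLoopA, if_neg h]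
        rw [ih, ih (ranges := [] ++ [_])]
        simp

-- A's loop, run-by-run
theorem fmrLoopA_runs (xs : List Int) (s p : Int) :
    fmrLoopA [] s p xs
      = fmrRender s ((fmrExt p xs).1.getLastD p)
          :: (match (fmrExt p xs).2 with
              | [] => []
              | y :: ys => fmrLoopA [] y y ys) := by
  induction xs generalizing s p with
  | nil => simp [fmrLoopA, fmrExt, fmrRender]
  | cons x xs ih =>
      rw [fmrLoopA, fmrExt]
      by_cases h : x = p + 1
      · rw [if_pos h, if_pos h, ih]
        have hd : ∀ (r : List Int), r.getLastD x = (x :: r).getLastD p := by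
          intro r; rcases r with _ | ⟨a, as⟩
          · simp
          · simp only [List.getLastD_cons]
        rw [hd]
      · rw [if_neg h, if_neg h]
        rw [fmrLoopA_acc]
        simp [fmrRender]

-- B's blocks, run-by-run, equal A's loop
theorem fmrBlocks_eq (n : Nat) : ∀ (xs : List Int), xs.length ≤ n → ∀ (x i : Int),
    fmrBlocks (fmrPairs i (x :: xs)) = fmrLoopA [] x x xs := by
  induction n with
  | zero =>
      intro xs hn x i
      have hxs : xs = [] := List.eq_nil_of_length_eq_zero (by omega)
      subst hxs
      rw [fmrPairs_cons, fmrPairs_nil, fmrBlocks_cons]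
      simp [fmrScan, fmrBlocks, fmrLoopA]
  | succ n ih =>
      intro xs hn x i
      have hs := fmrScan_ext xs i x
      rw [fmrPairs_cons, fmrBlocks_cons, hs.1, hs.2.1, hs.2.2, fmrPairs_map_snd]
      rw [fmrLoopA_runs]
      have hlen := fmrExt_len x xs
      congr 1
      · -- the rendered head string
        rcases hr : (fmrExt x xs).1 with _ | ⟨a, as⟩
        · simp [fmrRender]
        · have hmem : (a :: as).getLastD x ∈ (a :: as) := by
            rcases as with _ | ⟨b, bs⟩
            · simp
            · rw [List.getLastD_cons]
              exact List.mem_cons_of_mem _ (by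
                have h2 : (b :: bs).getLastD a = (b :: bs).getLast (by simp) := by
                  rw [List.getLastD_eq_getLast?, List.getLast?_eq_some_getLast (by simp)]
                  rfl
                rw [h2]; exact List.getLast_mem _)
          have hgt : x < ((a :: as).getLastD x) := by
            apply fmrExt_gt x xs
            rw [hr]; exact hmem
          have hne1 : ¬ (x :: a :: as).length = 1 := by simp
      -- A's pair at the end of this run is (x, run.getLastD x) and they differ, so both render "s-p"
          have hne : ¬ x = ((a :: as).getLastD x) := by omega
          rw [if_neg hne1, fmrRender, if_neg hne]
          have hlast : ((x :: a :: as).getLastD 0) = ((a :: as).getLastD x) := by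
            rw [List.getLastD_cons]
          rw [hlast]
      · -- the tail
        rcases ht : (fmrExt x xs).2 with _ | ⟨y, ys⟩
        · rw [fmrPairs_nil, fmrBlocks]
        · apply ih
          rw [ht] at hlen
          simp only [List.length_cons] at hlen
          omega

-- ===== VERDICT (by name: the statement is the Claim_ definition above) =====
theorem format_missing_ranges_spec : Claim_equal_format_missing_ranges := by
  intro l _
  unfold Spec_format_missing_ranges format_missing_ranges format_missing_ranges_alt
  match l with
  | [] => simp [PySem.List.enumerate_nil, fmrBlocks, PySem.Str.join]
  | h :: t =>
      have hp : (PySem.List.enumerate (h :: t) 0).map (fun p => (p.2 - p.1, p.2)) = fmrPairs 0 (h :: t) := rfl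
      rw [hp, fmrBlocks_eq t.length t (le_refl _) h 0]
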